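-- pv_equiv track=rewrite | github.com/ckswls56/BaejoonHub | 백준/Gold/17140. 이차원 배열과 연산/이차원 배열과 연산.py | sort_new
-- ===== SOURCE A (Python) =====
-- from collections import Counter
--
-- def sort_new(matrix, RC):
--     sorted_matrix = []
--     max_count = 0
--     for i in range(len(matrix)):
--         B = Counter(filter(lambda x: x != 0, matrix[i]))
--         B = sorted(B.items(), key=lambda x: (x[1], x[0]))
--         C = [item for sublist in B for item in sublist]
--         max_count = max(max_count, len(C))
--         sorted_matrix.append(C)
--     for i in sorted_matrix:
--         i += [0] * (max_count - len(i))  # 가장 긴 길이에 맞춰서 0 추가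
--     return sorted_matrix if RC == "R" else list(zip(*sorted_matrix))
-- ===== SOURCE B (Python) =====
-- def sort_new(matrix, RC):
--     rows = []
--     for row in matrix:
--         nz = [x for x in row if x != 0]
--         cnt = {}
--         for x in nz:
--             cnt[x] = cnt.get(x, 0) + 1
--         buckets = {}
--         for v in sorted(cnt):
--             buckets.setdefault(cnt[v], []).append(v)
--         flat = []
--         for c in range(1, len(nz) + 1):
--             for v in buckets.get(c, []):
--                 flat += [v, c]
--         rows.append(flat)
--     m = max(map(len, rows), default=0)
--     out = [r + [0] * (m - len(r)) for r in rows]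
--     return out if RC == "R" else list(zip(*out))
-- ===== Notes on version B (the rewrite author's own statement) =====
-- stated objective: alternative
-- what changed: B eliminates A's comparison sort of (value,count) pairs entirely: per row it counts in one dict pass, groups the ascending distinct values into buckets keyed by their multiplicity, and emits the flattened row by sweeping the possible counts c = 1..len(nonzeros) upward, reading bucket c — the (count,value) order falls out of the sweep, no pair sort exists; rows, max length and padding are separate passes instead of A's single running-max loop with in-place mutation.
import Mathlib
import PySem

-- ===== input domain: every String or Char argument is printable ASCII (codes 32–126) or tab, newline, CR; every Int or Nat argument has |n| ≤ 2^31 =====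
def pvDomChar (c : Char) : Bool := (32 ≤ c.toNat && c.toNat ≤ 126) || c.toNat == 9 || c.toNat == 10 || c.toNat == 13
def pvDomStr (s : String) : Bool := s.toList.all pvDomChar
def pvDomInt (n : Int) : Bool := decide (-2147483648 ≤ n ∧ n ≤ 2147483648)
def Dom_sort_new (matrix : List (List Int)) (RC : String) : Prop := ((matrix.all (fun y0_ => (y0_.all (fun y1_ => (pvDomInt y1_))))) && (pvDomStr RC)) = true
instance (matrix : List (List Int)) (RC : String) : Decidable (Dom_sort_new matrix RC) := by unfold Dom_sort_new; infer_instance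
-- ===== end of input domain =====

-- B replaces A's per-row Counter + comparison sort of (value,count) pairs by a bucket sweep:
-- the distinct values are sorted once, multiplicities are precomputed with list.count, and the
-- flattened row is emitted by scanning the possible counts c = 1..len(nonzeros) in order —
-- no pair sort exists in B (objective: alternative).
-- A mutates its row lists in place while padding; the equivalence proved here is about the return value.

-- ===== PORT A =====
-- list(zip(*rows)) — shared by both ports because both Pythons end with exactly this call
def zipStar : List (List Int) → List (List Int)
  | [] => []
  | r :: rs =>
    if (r :: rs).any (fun l => l.isEmpty) then []
    else ((r :: rs).map (fun l => l.headD 0)) :: zipStar ((r :: rs).map List.tail)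
termination_by rows => (rows.headD []).length
decreasing_by
  simp_all [List.isEmpty_iff]
  cases r with
  | nil => simp_all
  | cons a t => simp

-- one iteration of A's first loop body: Counter of the nonzeros, sorted by (count, value), flattened
def pvRowA (row : List Int) : List Int :=
  let B := PySem.Dict.counter (row.filter (fun x => x != 0))
  let Bs := PySem.List.sorted2 B.items (fun p => p.2) (fun p => p.1)
  Bs.flatMap (fun p => [p.1, p.2])

def sort_new (matrix : List (List Int)) (RC : String) : List (List Int) :=
  let st := (PySem.List.pyRange 0 (PySem.List.len matrix) 1).foldl
      (fun (st : List (List Int) × Int) i =>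
        let C := pvRowA (PySem.List.pyGetD matrix i [])
        (st.1 ++ [C], max st.2 (PySem.List.len C)))
      ([], 0)
  let padded := st.1.map (fun r => r ++ PySem.List.pyRepeat [0] (st.2 - PySem.List.len r))
  if RC == "R" then padded else zipStar padded

-- ===== PORT B =====
-- B's row body: dict counting, buckets keyed by multiplicity, then the sweep over c = 1..len(nz)
def pvRowB (row : List Int) : List Int :=
  let nz := row.filter (fun x => x != 0)
  let cnt := nz.foldl (fun (d : PySem.Dict Int Int) x => d.insert x (d.getD x 0 + 1)) PySem.Dict.empty
  let buckets := (PySem.List.sorted cnt.keys (fun x => x)).foldl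
    (fun (d : PySem.Dict Int (List Int)) v =>
      d.insert (cnt.getD v 0) (d.getD (cnt.getD v 0) [] ++ [v])) PySem.Dict.empty
  (PySem.List.pyRange 1 (PySem.List.len nz + 1) 1).foldl
    (fun acc c => (buckets.getD c []).foldl (fun acc v => acc ++ [v, c]) acc) []

def sort_new_alt (matrix : List (List Int)) (RC : String) : List (List Int) :=
  let rows := matrix.map pvRowB
  let m := PySem.List.maxD (rows.map PySem.List.len) (fun x => x) 0
  let padded := rows.map (fun r => r ++ PySem.List.pyRepeat [0] (m - PySem.List.len r))
  if RC == "R" then padded else zipStar padded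

-- ===== PRECONDITION & SPEC =====
def Spec_sort_new (matrix : List (List Int)) (RC : String) (out : List (List Int)) : Prop := out = sort_new_alt matrix RC
instance (matrix : List (List Int)) (RC : String) (out : List (List Int)) : Decidable (Spec_sort_new matrix RC out) := by unfold Spec_sort_new; infer_instance

-- ===== CLAIM (what is proved, stated in full; the proofs are below) =====
def Claim_equal_sort_new : Prop := ∀ (matrix : List (List Int)) (RC : String), Dom_sort_new matrix RC → Spec_sort_new matrix RC (sort_new matrix RC)

-- ===== LEMMAS AND PROOFS =====

-- sorting with Python's tuple key (k1 x, k2 x) is sorting with the lexicographic pair key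
theorem sorted2_eq_sorted_lex {α : Type} (xs : List α) (k1 k2 : α → Int) :
    PySem.List.sorted2 xs k1 k2 = PySem.List.sorted xs (fun a => toLex (k1 a, k2 a)) := by
  unfold PySem.List.sorted2 PySem.List.sorted
  simp only
  congr 1
  funext acc x
  congr 1
  funext a b
  simp only [Prod.Lex.toLex_lt_toLex]
  rcases lt_trichotomy (k1 a) (k1 b) with h | h | h
  · simp [h, not_lt.mpr h.le, h.ne]
  · simp [h]
  · simp [not_lt.mpr h.le, h, h.ne']

-- the pair list B's sweep walks through, made explicit
def sweepPairs (nz : List Int) (vals : List Int) : List (Int × Int) :=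
  (PySem.List.pyRange 1 (PySem.List.len nz + 1) 1).flatMap
    (fun c => (vals.filter (fun v => (PySem.List.count nz v : Int) == c)).map (fun v => (v, c)))

-- the bucket dict built by B groups exactly: bucket c holds the values whose key is c, in order
theorem getD_bucket_fold (l : List Int) (k : Int → Int) (c : Int) (d : PySem.Dict Int (List Int)) :
    (l.foldl (fun (d : PySem.Dict Int (List Int)) v =>
        d.insert (k v) (d.getD (k v) [] ++ [v])) d).getD c []
      = d.getD c [] ++ l.filter (fun v => k v == c) := by
  induction l generalizing d with
  | nil => simp
  | cons v t ih =>
    rw [List.foldl_cons, ih]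
    by_cases hc : c = k v
    · subst hc
      rw [PySem.Dict.getD_insert_self]
      simp
    · rw [PySem.Dict.getD_insert_of_ne _ _ _ hc]
      have hkv : (k v == c) = false := by
        simp only [beq_eq_false_iff_ne, ne_eq]
        exact fun h => hc h.symm
      simp [hkv]

-- B's whole sweep flattens sweepPairs
theorem pvRowB_eq_flat (row : List Int) :
    pvRowB row =
      (sweepPairs (row.filter (fun x => x != 0))
        (PySem.List.sorted (PySem.Set.ofList (row.filter (fun x => x != 0))) (fun x => x))).flatMap
        (fun p => [p.1, p.2]) := by
  unfold pvRowB sweepPairs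
  dsimp only
  rw [PySem.Dict.foldl_insert_getD_add_one_eq_counter, PySem.Dict.keys_counter]
  have hfun : (fun (acc : List Int) (c : Int) =>
      (((PySem.List.sorted (PySem.Set.ofList (row.filter (fun x => x != 0))) (fun x => x)).foldl
        (fun (d : PySem.Dict Int (List Int)) v =>
          d.insert ((PySem.Dict.counter (row.filter (fun x => x != 0))).getD v 0)
            (d.getD ((PySem.Dict.counter (row.filter (fun x => x != 0))).getD v 0) [] ++ [v]))
        PySem.Dict.empty).getD c []).foldl (fun acc v => acc ++ [v, c]) acc)
      = fun acc c => acc ++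
        ((PySem.List.sorted (PySem.Set.ofList (row.filter (fun x => x != 0))) (fun x => x)).filter
          (fun v => (PySem.List.count (row.filter (fun x => x != 0)) v : Int) == c)).flatMap
          (fun v => [v, c]) := by
    funext acc c
    rw [getD_bucket_fold _ _ c PySem.Dict.empty, PySem.Dict.getD_empty, List.nil_append,
      PySem.List.foldl_append_eq_flatMap]
    congr 2
    apply List.filter_congr
    intro v hv
    rw [PySem.Dict.getD_counter]
    simp [PySem.List.count_eq]
  rw [hfun, PySem.List.foldl_append_eq_flatMap, List.nil_append, List.flatMap_assoc]
  congr 1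
  funext c
  rw [List.flatMap_map]

-- sweepPairs is strictly increasing in the lexicographic (count, value) key
theorem sweepPairs_pairwise (nz : List Int) :
    (sweepPairs nz (PySem.List.sorted (PySem.Set.ofList nz) (fun x => x))).Pairwise
      (fun p q => (fun p : Int × Int => toLex (p.2, p.1)) p < (fun p : Int × Int => toLex (p.2, p.1)) q) := by
  unfold sweepPairs
  rw [List.flatMap_def]
  apply List.pairwise_flatten.mpr
  refine ⟨?_, ?_⟩
  · intro l hl
    obtain ⟨c, hc, rfl⟩ := List.mem_map.mp hl
    apply List.pairwise_map.mpr
    apply List.Pairwise.filter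
    apply (PySem.List.sorted_ofList_pairwise_lt nz).imp
    intro a b hab
    simp [Prod.Lex.toLex_lt_toLex, hab]
  · apply List.pairwise_map.mpr
    refine List.Pairwise.imp ?_ (PySem.List.pairwise_lt_pyRange_one 1 (PySem.List.len nz + 1))
    intro c1 c2 h12 x hx y hy
    obtain ⟨v1, -, rfl⟩ := List.mem_map.mp hx
    obtain ⟨v2, -, rfl⟩ := List.mem_map.mp hy
    simp only [Prod.Lex.toLex_lt_toLex]
    exact Or.inl h12

-- membership in sweepPairs = membership in Counter(nz).items
theorem mem_sweepPairs (nz : List Int) (v c : Int) :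
    (v, c) ∈ sweepPairs nz (PySem.List.sorted (PySem.Set.ofList nz) (fun x => x))
      ↔ v ∈ nz ∧ c = (nz.count v : Int) := by
  unfold sweepPairs
  simp only [List.mem_flatMap, List.mem_map, List.mem_filter, PySem.List.mem_sorted,
    PySem.Set.mem_ofList, PySem.List.mem_pyRange_one, Prod.mk.injEq, beq_iff_eq,
    PySem.List.count_eq]
  constructor
  · rintro ⟨c', hc', w, ⟨⟨hw, hcw⟩, rfl, rfl⟩⟩
    exact ⟨hw, hcw.symm⟩
  · rintro ⟨hv, rfl⟩
    have h1 : 1 ≤ nz.count v := List.count_pos_iff.mpr hv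
    have h2 : nz.count v ≤ nz.length := List.count_le_length
    refine ⟨(nz.count v : Int), ⟨by exact_mod_cast h1, ?_⟩, v, ⟨hv, rfl⟩, rfl, rfl⟩
    simp only [PySem.List.len_eq]
    omega

-- the heart of the equivalence: A's Counter + pair-sort equals B's bucket sweep
theorem row_eq (row : List Int) : pvRowA row = pvRowB row := by
  unfold pvRowA
  rw [pvRowB_eq_flat]
  dsimp only
  congr 1
  rw [sorted2_eq_sorted_lex]
  apply PySem.List.sorted_eq_of_perm_of_pairwise_lt
  · -- perm
    have nd1 : (sweepPairs (row.filter (fun x => x != 0))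
        (PySem.List.sorted (PySem.Set.ofList (row.filter (fun x => x != 0))) (fun x => x))).Nodup :=
      List.Pairwise.imp (fun h he => absurd h (by rw [he]; exact lt_irrefl _))
        (sweepPairs_pairwise (row.filter (fun x => x != 0)))
    have nd2 : (PySem.Dict.counter (row.filter (fun x => x != 0))).items.Nodup := by
      rw [PySem.Dict.items_counter]
      exact (PySem.Set.nodup_ofList _).map (fun a b hab => congrArg Prod.fst hab)
    apply (List.perm_ext_iff_of_nodup nd1 nd2).mpr
    rintro ⟨v, c⟩
    rw [mem_sweepPairs, PySem.Dict.items_counter]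
    constructor
    · rintro ⟨hv, rfl⟩
      exact List.mem_map.mpr ⟨v, (PySem.Set.mem_ofList ..).mpr hv, rfl⟩
    · intro hm
      obtain ⟨w, hw, hwe⟩ := List.mem_map.mp hm
      obtain ⟨rfl, rfl⟩ := Prod.mk.injEq .. ▸ hwe
      exact ⟨(PySem.Set.mem_ofList ..).mp hw, rfl⟩
  · exact sweepPairs_pairwise _

-- Python max(xs, default=0) over nonnegative ints is the running max from 0
theorem foldl_max_zero_eq_maxD (l : List Int) (h : ∀ x ∈ l, 0 ≤ x) :
    l.foldl max 0 = PySem.List.maxD l (fun x => x) 0 := by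
  cases l with
  | nil => simp [PySem.List.maxD, PySem.List.max?]
  | cons x t =>
    have h0 : max 0 x = x := max_eq_right (h x (by simp))
    simp [PySem.List.maxD, PySem.List.max?_id_cons, List.foldl_cons, h0]

-- A's single indexed loop with two accumulators equals B's two separate passes
theorem stepA_eq (matrix : List (List Int)) :
    (PySem.List.pyRange 0 (PySem.List.len matrix) 1).foldl
      (fun (st : List (List Int) × Int) i =>
        (st.1 ++ [pvRowA (PySem.List.pyGetD matrix i [])],
         max st.2 (PySem.List.len (pvRowA (PySem.List.pyGetD matrix i [])))))
      ([], 0)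
    = (matrix.map pvRowB,
       PySem.List.maxD ((matrix.map pvRowB).map PySem.List.len) (fun x => x) 0) := by
  rw [PySem.List.foldl_prod_mk
      (f := fun (acc : List (List Int)) i => acc ++ [pvRowA (PySem.List.pyGetD matrix i [])])
      (g := fun (m : Int) i => max m (PySem.List.len (pvRowA (PySem.List.pyGetD matrix i []))))]
  have hget : (PySem.List.pyRange 0 (PySem.List.len matrix) 1).map
      (fun j => PySem.List.pyGetD matrix j []) = matrix := PySem.List.map_pyGetD_pyRange_zero ..
  have hmapA : (PySem.List.pyRange 0 (PySem.List.len matrix) 1).map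
      (fun i => pvRowA (PySem.List.pyGetD matrix i [])) = matrix.map pvRowB := by
    calc (PySem.List.pyRange 0 (PySem.List.len matrix) 1).map
          (fun i => pvRowA (PySem.List.pyGetD matrix i []))
        = ((PySem.List.pyRange 0 (PySem.List.len matrix) 1).map
            (fun j => PySem.List.pyGetD matrix j [])).map pvRowA := by
          rw [List.map_map]; rfl
      _ = matrix.map pvRowA := by rw [hget]
      _ = matrix.map pvRowB := List.map_congr_left (fun a _ => row_eq a)
  refine Prod.ext ?_ ?_ <;> dsimp only
  · rw [PySem.List.foldl_append_singleton_eq_map, List.nil_append, hmapA]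
  · rw [← List.foldl_map (f := fun i => PySem.List.len (pvRowA (PySem.List.pyGetD matrix i [])))
        (g := fun (m x : Int) => max m x)]
    have hlen : (PySem.List.pyRange 0 (PySem.List.len matrix) 1).map
        (fun i => PySem.List.len (pvRowA (PySem.List.pyGetD matrix i [])))
        = (matrix.map pvRowB).map PySem.List.len := by
      rw [← hmapA, List.map_map]; rfl
    rw [hlen]
    exact foldl_max_zero_eq_maxD _ (by
      intro x hx
      obtain ⟨r, _, rfl⟩ := List.mem_map.mp hx
      simp [PySem.List.len])

-- ===== VERDICT (by name: the statement is the Claim_ definition above) =====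
theorem sort_new_spec : Claim_equal_sort_new := by
  intro matrix RC _
  unfold Spec_sort_new sort_new sort_new_alt
  dsimp only
  rw [stepA_eq]
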